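-- pv_equiv track=rewrite | github.com/yueyuep/GraphSim | Utils.py | getpairFile
-- ===== SOURCE A (Python) =====
-- def getpairFile(basefileList,targetfileList):
--     #只处理文件数目没有变化
--     pairfile=[]
--     for base in basefileList:
--         base_split=base.split("\\")
--         base_name=base_split[len(base_split)-1]
--         for target in targetfileList:
--             target_split=target.split("\\")
--             target_name=target_split[len(target_split)-1]
--             if base_name==target_name:
--                 list=[base,target]
--                 pairfile.append(list)
--     return pairfile
-- ===== SOURCE B (Python) =====
-- def getpairFile(basefileList, targetfileList):
--     # Index targets by basename once, then a single pass over bases.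
--     index = {}
--     for target in targetfileList:
--         index.setdefault(target.split("\\")[-1], []).append(target)
--     pairfile = []
--     for base in basefileList:
--         for target in index.get(base.split("\\")[-1], []):
--             pairfile.append([base, target])
--     return pairfile
-- ===== Notes on version B (the rewrite author's own statement) =====
-- stated objective: faster
-- what changed: Replaces the nested scan over all base/target pairs by a dict grouping targets by basename built in one pass, then a single pass over bases looking up matching targets.
import Mathlib
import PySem

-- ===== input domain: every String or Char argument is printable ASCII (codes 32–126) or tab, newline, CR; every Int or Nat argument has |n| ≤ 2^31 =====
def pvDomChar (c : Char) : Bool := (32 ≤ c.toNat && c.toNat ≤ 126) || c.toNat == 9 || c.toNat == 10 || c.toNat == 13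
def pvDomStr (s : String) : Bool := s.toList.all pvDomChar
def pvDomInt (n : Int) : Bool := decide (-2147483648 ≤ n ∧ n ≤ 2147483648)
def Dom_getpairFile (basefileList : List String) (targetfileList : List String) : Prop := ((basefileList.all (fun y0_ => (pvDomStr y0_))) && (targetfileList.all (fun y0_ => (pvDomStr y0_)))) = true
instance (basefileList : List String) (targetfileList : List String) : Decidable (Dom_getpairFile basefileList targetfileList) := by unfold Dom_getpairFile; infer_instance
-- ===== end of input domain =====

-- B is an exact re-implementation: it groups targets by basename in a dict once, then does a single pass over bases (A scans all targets for every base); return values are identical.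

-- ===== PORT A =====
-- literal transliteration of A's nested loops; split("\\") never raises, and the
-- index len(split)-1 is always in range, so pyGetD is exact here
def getpairFile (basefileList : List String) (targetfileList : List String) : List (List String) :=
  basefileList.foldl (fun pairfile base =>
    let base_split := (PySem.Str.split? base "\\").getD []
    let base_name := PySem.List.pyGetD base_split ((base_split.length : Int) - 1) ""
    targetfileList.foldl (fun pf target =>
      let target_split := (PySem.Str.split? target "\\").getD []
      let target_name := PySem.List.pyGetD target_split ((target_split.length : Int) - 1) ""
      if base_name == target_name then pf ++ [[base, target]] else pf) pairfile) []

-- ===== PORT B =====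
-- Source B's target.split("\\")[-1]
def pvBname (s : String) : String :=
  PySem.List.pyGetD ((PySem.Str.split? s "\\").getD []) (-1) ""

-- Source B's index-building loop (setdefault(...,[]).append(t) = modify with default [])
def pvIndex (targetfileList : List String) : PySem.Dict String (List String) :=
  targetfileList.foldl (fun d target => d.modify (pvBname target) [] (· ++ [target])) PySem.Dict.empty

def getpairFile_alt (basefileList : List String) (targetfileList : List String) : List (List String) :=
  let idx := pvIndex targetfileList
  basefileList.foldl (fun pairfile base =>
    pairfile ++ (idx.getD (pvBname base) []).map (fun target => [base, target])) []

-- ===== PRECONDITION & SPEC =====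
def Spec_getpairFile (basefileList : List String) (targetfileList : List String) (out : List (List String)) : Prop := out = getpairFile_alt basefileList targetfileList
instance (basefileList : List String) (targetfileList : List String) (out : List (List String)) : Decidable (Spec_getpairFile basefileList targetfileList out) := by unfold Spec_getpairFile; infer_instance

-- ===== CLAIM (what is proved, stated in full; the proofs are below) =====
def Claim_equal_getpairFile : Prop := ∀ (basefileList : List String) (targetfileList : List String), Dom_getpairFile basefileList targetfileList → Spec_getpairFile basefileList targetfileList (getpairFile basefileList targetfileList)

-- ===== LEMMAS AND PROOFS =====

-- A's xs[len(xs)-1] equals B's xs[-1] (on [], both give the default)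
theorem pvLastIdx {α : Type} (xs : List α) (d : α) :
    PySem.List.pyGetD xs ((xs.length : Int) - 1) d = PySem.List.pyGetD xs (-1) d := by
  cases h : xs with
  | nil => norm_num
  | cons a l =>
    have hne : xs ≠ [] := by simp [h]
    rw [← h, PySem.List.pyGetD_neg_one xs d hne]
    have hlen : (xs.length : Int) - 1 = ((xs.length - 1 : Nat) : Int) := by
      have : 1 ≤ xs.length := by simp [h]
      omega
    rw [hlen, PySem.List.pyGetD_natCast]
    rw [List.getLast_eq_getElem]
    rw [List.getD_eq_getElem?_getD, List.getElem?_eq_getElem (by omega)]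
    rfl

-- the dict built by B holds, under each name, exactly the targets with that basename
theorem pvIndex_getD (ts : List String) (c : String) :
    (pvIndex ts).getD c [] = ts.filter (fun t => pvBname t == c) := by
  have hmap : pvIndex ts
      = (ts.map (fun t => (pvBname t, t))).foldl
          (fun d p => d.modify p.1 [] (· ++ [p.2])) PySem.Dict.empty := by
    simp [pvIndex, List.foldl_map]
  rw [hmap, PySem.Dict.getD_foldl_modify_append]
  simp [List.filter_map, Function.comp_def, List.map_map]

-- A's inner loop over the targets collects exactly the matching pairs, in order
theorem pvInner {α β : Type} (p : α → Bool) (g : α → β) :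
    ∀ (ts : List α) (pf : List β),
      ts.foldl (fun acc t => if p t then acc ++ [g t] else acc) pf
        = pf ++ (ts.filter p).map g := by
  intro ts
  induction ts with
  | nil => simp
  | cons t rest ih =>
    intro pf
    by_cases hp : p t = true
    · simp [List.foldl_cons, hp, ih]
    · simp only [Bool.not_eq_true] at hp
      simp [List.foldl_cons, hp, ih]

theorem pvMain (bs ts : List String) :
    ∀ (acc : List (List String)),
      bs.foldl (fun pairfile base =>
        let base_split := (PySem.Str.split? base "\\").getD []
        let base_name := PySem.List.pyGetD base_split ((base_split.length : Int) - 1) ""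
        ts.foldl (fun pf target =>
          let target_split := (PySem.Str.split? target "\\").getD []
          let target_name := PySem.List.pyGetD target_split ((target_split.length : Int) - 1) ""
          if base_name == target_name then pf ++ [[base, target]] else pf) pairfile) acc
      = bs.foldl (fun pairfile base =>
          pairfile ++ ((pvIndex ts).getD (pvBname base) []).map (fun target => [base, target])) acc := by
  induction bs with
  | nil => intro acc; rfl
  | cons base rest ih =>
    intro acc
    simp only [List.foldl_cons]
    rw [ih]
    congr 1
    have hn : PySem.List.pyGetD ((PySem.Str.split? base "\\").getD [])
        (((PySem.Str.split? base "\\").getD []).length - 1 : Int) "" = pvBname base := by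
      rw [pvLastIdx]; rfl
    simp only [hn]
    have hbody : ∀ (pf : List (List String)) (target : String),
        (let target_split := (PySem.Str.split? target "\\").getD []
         let target_name := PySem.List.pyGetD target_split ((target_split.length : Int) - 1) ""
         if pvBname base == target_name then pf ++ [[base, target]] else pf)
        = (if (fun t => pvBname base == pvBname t) target then pf ++ [[base, target]] else pf) := by
      intro pf target
      simp only [pvLastIdx]
      rfl
    have hfun : (fun (pf : List (List String)) (target : String) =>
        let target_split := (PySem.Str.split? target "\\").getD []
        let target_name := PySem.List.pyGetD target_split ((target_split.length : Int) - 1) ""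
        if pvBname base == target_name then pf ++ [[base, target]] else pf)
        = (fun pf target =>
            if (fun t => pvBname base == pvBname t) target then pf ++ [[base, target]] else pf) := by
      funext pf target
      exact hbody pf target
    rw [hfun]
    calc ts.foldl (fun pf target =>
            if (fun t => pvBname base == pvBname t) target then pf ++ [[base, target]] else pf) acc
        = acc ++ (ts.filter (fun t => pvBname base == pvBname t)).map (fun target => [base, target]) :=
          pvInner _ _ ts acc
      _ = acc ++ ((pvIndex ts).getD (pvBname base) []).map (fun target => [base, target]) := by
          rw [pvIndex_getD]
          congr 2
          apply List.filter_congr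
          intro t _
          simp [eq_comm]

-- ===== VERDICT (by name: the statement is the Claim_ definition above) =====
theorem getpairFile_spec : Claim_equal_getpairFile := by
  intro bs ts _
  unfold Spec_getpairFile getpairFile getpairFile_alt
  exact pvMain bs ts []
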